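-- pv_equiv track=rewrite | github.com/yacine-harbi/orthotest | scripts/parse_words.py | count_syllables
-- ===== SOURCE A (Python) =====
-- def count_syllables(word: str) -> int:
--     """
--     Estimate syllable count for French words.
--     This is a simplified approach based on vowel patterns.
--     """
--     # Remove accents and convert to lowercase for counting
--     word_clean = word.lower()
--     # Count vowel groups (approximate syllable count)
--     vowels = 'aeiouyàáâäèéêëìíîïòóôöùúûü'
--     syllable_count = 0
--     prev_was_vowel = False
--
--     for char in word_clean:
--         if char in vowels:
--             if not prev_was_vowel:
--                 syllable_count += 1
--             prev_was_vowel = True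
--         else:
--             prev_was_vowel = False
--
--     # Adjust for silent 'e' at the end
--     if word_clean.endswith('e') and syllable_count > 1:
--         syllable_count -= 1
--
--     return max(1, syllable_count)  # At least 1 syllable
-- ===== SOURCE B (Python) =====
-- def count_syllables(word: str) -> int:
--     word_clean = word.lower()
--     vowels = 'aeiouyàáâäèéêëìíîïòóôöùúûü'
--     mask = [c in vowels for c in word_clean]
--     # identity: number of maximal vowel runs = (#vowels) - (#adjacent vowel-vowel pairs)
--     syllable_count = sum(mask) - sum(a and b for a, b in zip(mask, mask[1:]))
--     if word_clean.endswith('e') and syllable_count > 1: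
--         syllable_count -= 1
--     return max(1, syllable_count)
-- ===== Notes on version B (the rewrite author's own statement) =====
-- stated objective: alternative
-- what changed: Replaces the prev_was_vowel state-machine scan with pure counting arithmetic: build a vowel mask once, then compute syllables as (#vowels) minus (#adjacent vowel-vowel pairs), using the identity runs = vowels - internal adjacencies; same two final adjustments.
import Mathlib
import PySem

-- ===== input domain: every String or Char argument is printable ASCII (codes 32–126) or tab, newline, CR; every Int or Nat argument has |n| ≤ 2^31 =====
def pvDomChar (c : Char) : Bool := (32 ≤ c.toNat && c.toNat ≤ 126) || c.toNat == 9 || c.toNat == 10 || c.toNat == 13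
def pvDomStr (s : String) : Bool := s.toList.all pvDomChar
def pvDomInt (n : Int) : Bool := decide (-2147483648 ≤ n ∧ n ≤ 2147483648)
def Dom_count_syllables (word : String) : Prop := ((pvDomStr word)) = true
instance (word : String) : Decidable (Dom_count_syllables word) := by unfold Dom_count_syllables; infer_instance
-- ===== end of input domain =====

-- B replaces A's prev-flag state machine with counting arithmetic (#vowels minus #adjacent vowel pairs over a mask); objective: alternative, same cost.


-- ===== PORT A =====
def pvVowels : List Char := "aeiouyàáâäèéêëìíîïòóôöùúûü".toList

def pvIsV (c : Char) : Bool := c ∈ pvVowels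

-- A's for-loop over word_clean with (syllable_count, prev_was_vowel) state
def pvLoopA : List Char → Int → Bool → Int
  | [], c, _ => c
  | ch :: rest, c, prev =>
    if ch ∈ pvVowels then
      pvLoopA rest (if !prev then c + 1 else c) true
    else
      pvLoopA rest c false

def count_syllables (word : String) : Int :=
  let word_clean := PySem.Str.lower word
  let sc := pvLoopA word_clean.toList 0 false
  let sc := if PySem.Str.endswith word_clean "e" && decide (sc > 1) then sc - 1 else sc
  max 1 sc

-- ===== PORT B =====
-- B: vowel mask, then #vowels minus #adjacent vowel-vowel pairs (zip of the mask with its tail)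
def count_syllables_alt (word : String) : Int :=
  let word_clean := PySem.Str.lower word
  let mask := word_clean.toList.map (pvIsV)
  let sc : Int := (mask.count true : Int) - ((mask.zip mask.tail).countP (fun p => p.1 && p.2) : Int)
  let sc := if PySem.Str.endswith word_clean "e" && decide (sc > 1) then sc - 1 else sc
  max 1 sc

-- ===== PRECONDITION & SPEC =====
def Spec_count_syllables (word : String) (out : Int) : Prop := out = count_syllables_alt word
instance (word : String) (out : Int) : Decidable (Spec_count_syllables word out) := by unfold Spec_count_syllables; infer_instance

-- ===== CLAIM (what is proved, stated in full; the proofs are below) =====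
def Claim_equal_count_syllables : Prop := ∀ (word : String), Dom_count_syllables word → Spec_count_syllables word (count_syllables word)

-- ===== LEMMAS AND PROOFS =====
-- A's loop equals (#vowels) − (#adjacent true pairs in prev :: mask)
theorem pvLoopA_eq_count (l : List Char) : ∀ (c : Int) (prev : Bool),
    pvLoopA l c prev =
      c + (((l.map (pvIsV)).count true : Int)
        - (((prev :: l.map (pvIsV)).zip (l.map (pvIsV))).countP
            (fun p => p.1 && p.2) : Int)) := by
  induction l with
  | nil => intro c prev; simp [pvLoopA]
  | cons a t ih =>
    intro c prev
    by_cases hv : a ∈ pvVowels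
    · cases prev <;>
        simp [pvLoopA, hv, ih, pvIsV] <;> ring
    · cases prev <;>
        simp [pvLoopA, hv, ih, pvIsV]

-- zipping the mask with its tail counts the same pairs as zipping (false :: mask) with the mask
theorem pv_zip_false_cons (m : List Bool) :
    ((false :: m).zip m).countP (fun p => p.1 && p.2) =
      (m.zip m.tail).countP (fun p => p.1 && p.2) := by
  cases m with
  | nil => simp
  | cons b t => simp

-- ===== VERDICT (by name: the statement is the Claim_ definition above) =====
theorem count_syllables_spec : Claim_equal_count_syllables := by
  intro word _
  unfold Spec_count_syllables count_syllables count_syllables_alt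
  simp only [pvLoopA_eq_count, pv_zip_false_cons]
  simp
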